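-- pv_equiv track=rewrite | github.com/elena-selvasai/auto-tester | scripts/qa_cli.py | get_next_action_text
-- ===== SOURCE A (Python) =====
-- PHASE_ORDER = [0, 1, 2, 3, 4, 5, 5.5, 6]
--
-- def get_phase_key(phase_num):
--     """Phase 번호를 YAML 키(문자열)로 변환. 5.5 포함."""
--     return str(float(phase_num)) if phase_num == 5.5 else str(int(phase_num))
--
-- def find_next_pending(state):
--     """다음 pending 상태의 Phase 번호 반환. 없으면 None."""
--     phases = state.get("phases", {})
--     for p in PHASE_ORDER:
--         key = get_phase_key(p)
--         st = phases.get(key, {}).get("status", "pending")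
--         if st == "pending":
--             return p
--     return None
--
-- def get_next_action_text(state, current_phase=None):
--     """현재 상태에서 다음 할 일 1개를 문자열로 반환."""
--     phases = state.get("phases", {})
--
--     # in_progress Phase 찾기
--     for p in PHASE_ORDER:
--         key = get_phase_key(p)
--         if phases.get(key, {}).get("status") == "in_progress":
--             return f"Phase {p} 작업을 완료한 후 실행: python scripts/qa_cli.py complete {p}"
--
--     # 다음 pending Phase 찾기
--     nxt = find_next_pending(state)
--     if nxt is not None:
--         return f"다음 Phase 시작: python scripts/qa_cli.py start {nxt}"
--
--     return "모든 Phase 완료. python scripts/qa_cli.py status 로 결과를 확인하세요."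
-- ===== SOURCE B (Python) =====
-- PHASE_ORDER = [0, 1, 2, 3, 4, 5, 5.5, 6]
--
-- def get_phase_key(phase_num):
--     return str(float(phase_num)) if phase_num == 5.5 else str(int(phase_num))
--
-- def get_next_action_text(state, current_phase=None):
--     """Single pass over PHASE_ORDER: return on the first in_progress phase,
--     remembering the first pending phase on the way."""
--     phases = state.get("phases", {})
--     first_pending = None
--     for p in PHASE_ORDER:
--         st = phases.get(get_phase_key(p), {}).get("status")
--         if st == "in_progress":
--             return f"Phase {p} 작업을 완료한 후 실행: python scripts/qa_cli.py complete {p}"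
--         if first_pending is None and (st is None or st == "pending"):
--             first_pending = p
--     if first_pending is not None:
--         return f"다음 Phase 시작: python scripts/qa_cli.py start {first_pending}"
--     return "모든 Phase 완료. python scripts/qa_cli.py status 로 결과를 확인하세요."
-- ===== Notes on version B (the rewrite author's own statement) =====
-- stated objective: simpler
-- what changed: Replaces A's two full scans of PHASE_ORDER (one for in_progress, then a helper rescanning for pending) with a single loop that returns on the first in_progress phase while remembering the first pending phase.
import Mathlib
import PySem

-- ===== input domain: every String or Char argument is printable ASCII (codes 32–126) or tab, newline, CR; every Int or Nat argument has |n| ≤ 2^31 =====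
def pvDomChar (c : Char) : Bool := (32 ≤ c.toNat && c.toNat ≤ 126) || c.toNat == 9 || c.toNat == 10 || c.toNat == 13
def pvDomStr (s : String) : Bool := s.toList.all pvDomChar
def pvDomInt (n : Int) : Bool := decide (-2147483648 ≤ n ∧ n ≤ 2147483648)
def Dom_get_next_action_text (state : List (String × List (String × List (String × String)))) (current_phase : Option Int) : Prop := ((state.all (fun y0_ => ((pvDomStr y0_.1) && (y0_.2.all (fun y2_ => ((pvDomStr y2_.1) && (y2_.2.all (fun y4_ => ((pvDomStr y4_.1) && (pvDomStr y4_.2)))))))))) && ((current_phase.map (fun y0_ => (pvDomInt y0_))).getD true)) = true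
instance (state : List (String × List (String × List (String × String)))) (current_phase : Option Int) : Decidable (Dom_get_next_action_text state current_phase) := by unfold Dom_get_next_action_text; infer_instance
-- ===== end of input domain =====

-- B replaces A's two scans of PHASE_ORDER (in_progress scan, then a pending rescan via a helper)
-- with one scan that remembers the first pending phase; objective: simpler.


-- ===== PORT A =====
-- PHASE_ORDER with each phase already rendered as its string: for every p in the Python list,
-- get_phase_key(p) = str(p) (exact: "5.5" for the float 5.5, plain decimal for the ints), so one
-- string per phase serves both as the YAML key and as the text interpolated into the f-strings.
def pvPhaseOrder : List String := ["0", "1", "2", "3", "4", "5", "5.5", "6"]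

-- find_next_pending: first phase whose status (default "pending") is "pending"
def find_next_pending (state : List (String × List (String × List (String × String)))) : Option String :=
  let phases := (PySem.Dict.get? (PySem.Dict.mk state) "phases").getD []
  pvPhaseOrder.find? (fun key =>
    PySem.Dict.getD (PySem.Dict.mk ((PySem.Dict.get? (PySem.Dict.mk phases) key).getD [])) "status" "pending" == "pending")

def get_next_action_text (state : List (String × List (String × List (String × String)))) (current_phase : Option Int) : String :=
  let phases := (PySem.Dict.get? (PySem.Dict.mk state) "phases").getD []
  match pvPhaseOrder.find? (fun key =>
      PySem.Dict.get? (PySem.Dict.mk ((PySem.Dict.get? (PySem.Dict.mk phases) key).getD [])) "status" == some "in_progress") with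
  | some p => "Phase " ++ p ++ " 작업을 완료한 후 실행: python scripts/qa_cli.py complete " ++ p
  | none =>
    match find_next_pending state with
    | some nxt => "다음 Phase 시작: python scripts/qa_cli.py start " ++ nxt
    | none => "모든 Phase 완료. python scripts/qa_cli.py status 로 결과를 확인하세요."

-- ===== PORT B =====
-- single loop over the phase strings, carrying first_pending
def pvAltLoop (phases : PySem.Dict String (List (String × String))) :
    List String → Option String → String
  | [], fp =>
    match fp with
    | some q => "다음 Phase 시작: python scripts/qa_cli.py start " ++ q
    | none => "모든 Phase 완료. python scripts/qa_cli.py status 로 결과를 확인하세요."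
  | p :: rest, fp =>
    let st := PySem.Dict.get? (PySem.Dict.mk ((PySem.Dict.get? phases p).getD [])) "status"
    if st == some "in_progress" then
      "Phase " ++ p ++ " 작업을 완료한 후 실행: python scripts/qa_cli.py complete " ++ p
    else
      pvAltLoop phases rest
        (if fp == none && (st == none || st == some "pending") then some p else fp)

def get_next_action_text_alt (state : List (String × List (String × List (String × String)))) (current_phase : Option Int) : String :=
  pvAltLoop (PySem.Dict.mk ((PySem.Dict.get? (PySem.Dict.mk state) "phases").getD [])) pvPhaseOrder none

-- ===== PRECONDITION & SPEC =====
def Spec_get_next_action_text (state : List (String × List (String × List (String × String)))) (current_phase : Option Int) (out : String) : Prop := out = get_next_action_text_alt state current_phase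
instance (state : List (String × List (String × List (String × String)))) (current_phase : Option Int) (out : String) : Decidable (Spec_get_next_action_text state current_phase out) := by unfold Spec_get_next_action_text; infer_instance

-- ===== CLAIM (what is proved, stated in full; the proofs are below) =====
def Claim_equal_get_next_action_text : Prop := ∀ (state : List (String × List (String × List (String × String)))) (current_phase : Option Int), Dom_get_next_action_text state current_phase → Spec_get_next_action_text state current_phase (get_next_action_text state current_phase)

-- ===== LEMMAS AND PROOFS =====

-- B's one loop computes: first in_progress phase wins; otherwise first_pending (or, failing that,
-- the first pending phase in the remaining list); otherwise the all-done message.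
theorem pvAltLoop_eq (phases : PySem.Dict String (List (String × String)))
    (ps : List String) (fp : Option String) :
    pvAltLoop phases ps fp =
      match ps.find? (fun key =>
          PySem.Dict.get? (PySem.Dict.mk ((PySem.Dict.get? phases key).getD [])) "status" == some "in_progress") with
      | some p => "Phase " ++ p ++ " 작업을 완료한 후 실행: python scripts/qa_cli.py complete " ++ p
      | none =>
        match fp.or (ps.find? (fun key =>
            PySem.Dict.getD (PySem.Dict.mk ((PySem.Dict.get? phases key).getD [])) "status" "pending" == "pending")) with
        | some q => "다음 Phase 시작: python scripts/qa_cli.py start " ++ q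
        | none => "모든 Phase 완료. python scripts/qa_cli.py status 로 결과를 확인하세요." := by
  induction ps generalizing fp with
  | nil => cases fp <;> simp [pvAltLoop]
  | cons p rest ih =>
    simp only [pvAltLoop, List.find?_cons]
    generalize hst : PySem.Dict.get? (PySem.Dict.mk ((PySem.Dict.get? phases p).getD [])) "status" = st
    have hpend : (PySem.Dict.getD (PySem.Dict.mk ((PySem.Dict.get? phases p).getD [])) "status" "pending" == "pending")
        = (st == none || st == some "pending") := by
      rw [PySem.Dict.getD_eq_get?_getD, hst]
      cases st <;> simp
    rw [hpend]
    by_cases hin : st == some "in_progress"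
    · simp [hin]
    · simp only [hin, Bool.false_eq_true, if_false, ih]
      cases fp with
      | some q => simp
      | none =>
        cases st with
        | none => simp
        | some s =>
          by_cases hs : s = "pending"
          · simp [hs]
          · have hb : (s == "pending") = false := by simp [hs]
            simp [hb]

-- ===== VERDICT (by name: the statement is the Claim_ definition above) =====
theorem get_next_action_text_spec : Claim_equal_get_next_action_text := by
  intro state current_phase _
  show get_next_action_text state current_phase = get_next_action_text_alt state current_phase
  rw [get_next_action_text, get_next_action_text_alt, find_next_pending, pvAltLoop_eq]
  rfl
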